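-- pv_equiv track=rewrite | github.com/maharshi95/cmsc701 | hw3/task1.py | find_ith_seq
-- ===== SOURCE A (Python) =====
-- def find_ith_seq(i: int, n: int, chars: list[str]):
--     if i >= len(chars) ** n:
--         raise ValueError("i must be less than len(chars) ** n.")
--     if n == 1:
--         return [chars[i]]
--     chunk_size = len(chars) ** (n - 1)
--     first_element = chars[i // chunk_size]
--     next_i = i % chunk_size
--     next_perm = find_ith_seq(next_i, n - 1, chars)
--     return [first_element] + next_perm
-- ===== SOURCE B (Python) =====
-- def find_ith_seq(i: int, n: int, chars: list[str]):
--     k = len(chars)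
--     if i >= k ** n:
--         raise ValueError("i must be less than len(chars) ** n.")
--     digits = []
--     for _ in range(n):
--         i, r = divmod(i, k)
--         digits.append(chars[r])
--     digits.reverse()
--     return digits
-- ===== Notes on version B (the rewrite author's own statement) =====
-- stated objective: faster
-- what changed: Replaced A's recursion that recomputes len(chars)**(n-1) at every of n levels with a single iterative divmod base-conversion loop collecting digits least-significant first and reversing, keeping the i < len(chars)**n check.
import Mathlib
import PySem

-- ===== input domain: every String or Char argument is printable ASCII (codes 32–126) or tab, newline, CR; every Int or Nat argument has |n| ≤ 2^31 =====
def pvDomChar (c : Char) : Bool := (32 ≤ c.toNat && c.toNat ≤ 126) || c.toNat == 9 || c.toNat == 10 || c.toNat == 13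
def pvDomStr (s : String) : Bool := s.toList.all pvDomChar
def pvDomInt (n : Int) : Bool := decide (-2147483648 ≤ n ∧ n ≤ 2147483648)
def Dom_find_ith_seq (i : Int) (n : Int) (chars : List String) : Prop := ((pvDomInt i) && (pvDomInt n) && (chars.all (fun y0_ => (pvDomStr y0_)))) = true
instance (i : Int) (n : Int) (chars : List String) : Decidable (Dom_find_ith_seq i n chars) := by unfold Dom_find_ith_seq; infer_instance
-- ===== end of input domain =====

-- B replaces A's O(n) recursion that recomputes len(chars)**(n-1) at every level (O(n^2) bignum
-- multiplications) with a single iterative divmod base-conversion loop (digits collected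
-- least-significant first, then reversed).

-- ===== PORT A =====
def find_ith_seq (i : Int) (n : Int) (chars : List String) : List String :=
  if (chars.length : Int) ^ n.toNat ≤ i then []  -- Python: raise ValueError (outside Pre_)
  else if n = 1 then [(PySem.List.pyGet? chars i).getD ""]  -- pyGet? none = IndexError (outside Pre_)
  else if n ≤ 0 then []  -- Python raises here (float exponent → TypeError); guard only for totality
  else
    let chunk_size := (chars.length : Int) ^ (n - 1).toNat
    let first_element := (PySem.List.pyGet? chars (PySem.Int.floordiv i chunk_size)).getD ""
    let next_i := PySem.Int.mod i chunk_size
    first_element :: find_ith_seq next_i (n - 1) chars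
termination_by n.toNat
decreasing_by omega

-- ===== PORT B =====
def find_ith_seq_alt (i : Int) (n : Int) (chars : List String) : List String :=
  let k : Int := chars.length
  if k ^ n.toNat ≤ i then []  -- Python: raise ValueError (outside Pre_)
  else
    (((PySem.List.pyRange 0 n 1).foldl
      (fun (acc : List String × Int) _ =>
        match PySem.Int.divmod? acc.2 k with
        | some (q, r) => (acc.1 ++ [(PySem.List.pyGet? chars r).getD ""], q)
        | none => (acc.1, acc.2))  -- divmod by 0 = ZeroDivisionError (chars = [], outside Pre_)
      ([], i)).1).reverse

-- ===== PRECONDITION & SPEC =====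
-- Pre_ = the inputs on which Python A returns normally: n ≥ 1 and -len**n ≤ i < len**n
-- (i ≥ len**n raises ValueError; i < -len**n raises IndexError; n ≤ 0 raises TypeError or
-- ZeroDivisionError; negative i down to -len**n RETURN via Python's negative-index wraparound
-- and are INCLUDED — B matches A there).
def Pre_find_ith_seq (i : Int) (n : Int) (chars : List String) : Prop :=
  1 ≤ n ∧ -((chars.length : Int) ^ n.toNat) ≤ i ∧ i < (chars.length : Int) ^ n.toNat
instance (i : Int) (n : Int) (chars : List String) : Decidable (Pre_find_ith_seq i n chars) := by
  unfold Pre_find_ith_seq; infer_instance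
def pvWitness_find_ith_seq : Int × Int × List String := (5, 2, ["a", "b", "c"])

def Spec_find_ith_seq (i : Int) (n : Int) (chars : List String) (out : List String) : Prop := out = find_ith_seq_alt i n chars
instance (i : Int) (n : Int) (chars : List String) (out : List String) : Decidable (Spec_find_ith_seq i n chars out) := by unfold Spec_find_ith_seq; infer_instance

-- ===== CLAIM (what is proved, stated in full; the proofs are below) =====
def Claim_equal_find_ith_seq : Prop := ∀ (i : Int) (n : Int) (chars : List String), Dom_find_ith_seq i n chars → Pre_find_ith_seq i n chars → Spec_find_ith_seq i n chars (find_ith_seq i n chars)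
-- ===== LEMMAS AND PROOFS =====

-- the digit string of i in base len(chars), least-significant digit first, m digits
def lsbDig (chars : List String) : Nat → Int → List String
  | 0, _ => []
  | m + 1, i =>
      (PySem.List.pyGet? chars (i % (chars.length : Int))).getD "" ::
        lsbDig chars m (i / (chars.length : Int))

theorem emod_pow_ediv (i k : Int) (m : Nat) (hk : 0 < k) :
    (i % k ^ (m + 1)) / k = (i / k) % k ^ m := by
  have h2 : i / k ^ (m + 1) = (i / k) / k ^ m := by
    rw [Int.ediv_ediv_of_nonneg (by positivity), pow_succ']
  rw [Int.emod_def, h2, Int.emod_def, pow_succ', mul_assoc, mul_comm k,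
    Int.sub_ediv_of_dvd _ (dvd_mul_left k _),
    Int.mul_ediv_cancel _ (by omega)]

-- Python's negative-index wraparound on an in-range index is reduction mod the length
theorem cget_wrap (chars : List String) (t : Int) (h1 : -(chars.length : Int) ≤ t)
    (h2 : t < (chars.length : Int)) :
    (PySem.List.pyGet? chars t).getD "" =
      (PySem.List.pyGet? chars (t % (chars.length : Int))).getD "" := by
  by_cases h : 0 ≤ t
  · rw [Int.emod_eq_of_lt h h2]
  · have hmod : t % (chars.length : Int) = t + chars.length := by
      conv_lhs => rw [show t = (t + chars.length) + (chars.length : Int) * (-1) by ring]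
      rw [Int.add_mul_emod_self_left, Int.emod_eq_of_lt (by omega) (by omega)]
    rw [hmod]
    simp only [PySem.List.pyGet?, PySem.List.pyIdx?]
    rw [if_neg h, if_pos h1, if_pos (show (0:Int) ≤ t + chars.length by omega),
      if_pos (show t + (chars.length : Int) < chars.length by omega)]
    have : chars.length - (-t).toNat = (t + (chars.length : Int)).toNat := by omega
    rw [this]

theorem foldl_lsb (chars : List String) (hk : chars ≠ []) (l : List Int) :
    ∀ (ds : List String) (j : Int),
      (l.foldl
        (fun (acc : List String × Int) _ =>
          match PySem.Int.divmod? acc.2 (chars.length : Int) with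
          | some (q, r) => (acc.1 ++ [(PySem.List.pyGet? chars r).getD ""], q)
          | none => (acc.1, acc.2)) (ds, j)).1 = ds ++ lsbDig chars l.length j := by
  induction l with
  | nil => intro ds j; simp [lsbDig]
  | cons x l ih =>
      intro ds j
      have hk0 : (0:Int) < chars.length := by
        exact_mod_cast List.length_pos_iff.mpr hk
      have hd : PySem.Int.divmod? j (chars.length : Int) =
          some (j / (chars.length : Int), j % (chars.length : Int)) := by
        simp [PySem.Int.divmod?, Int.fdiv_eq_ediv, Int.fmod_eq_emod, hk0.le, hk]
      simp only [List.foldl_cons, hd, List.length_cons]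
      rw [ih]
      simp [lsbDig, List.append_assoc]

theorem alt_eq (i n : Int) (chars : List String) (hk : chars ≠ [])
    (h : ¬ (chars.length : Int) ^ n.toNat ≤ i) :
    find_ith_seq_alt i n chars = (lsbDig chars n.toNat i).reverse := by
  unfold find_ith_seq_alt
  rw [if_neg h, foldl_lsb chars hk]
  simp [PySem.List.length_pyRange_one]

-- peel the MOST significant digit off the lsb-first digit string
theorem lsb_msb (chars : List String) (hk0 : (0:Int) < chars.length) :
    ∀ (m : Nat) (i : Int), lsbDig chars (m + 1) i =
      lsbDig chars m (i % (chars.length : Int) ^ m) ++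
        [(PySem.List.pyGet? chars
            ((i / (chars.length : Int) ^ m) % (chars.length : Int))).getD ""] := by
  intro m
  induction m with
  | zero => intro i; simp [lsbDig]
  | succ m ih =>
      intro i
      have e1 : i % (chars.length : Int) ^ (m + 1) % (chars.length : Int) =
          i % (chars.length : Int) := Int.emod_emod_of_dvd i (dvd_pow_self _ (by omega))
      have e2 : i % (chars.length : Int) ^ (m + 1) / (chars.length : Int) =
          (i / (chars.length : Int)) % (chars.length : Int) ^ m :=
        emod_pow_ediv i _ m hk0
      have e3 : i / (chars.length : Int) ^ (m + 1) =
          (i / (chars.length : Int)) / (chars.length : Int) ^ m := by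
        rw [Int.ediv_ediv_of_nonneg (by positivity), pow_succ']
      calc lsbDig chars (m + 2) i
          = (PySem.List.pyGet? chars (i % (chars.length : Int))).getD "" ::
              lsbDig chars (m + 1) (i / (chars.length : Int)) := rfl
        _ = _ := by rw [ih (i / (chars.length : Int))]; simp [lsbDig, e1, e2, e3]

theorem a_eq (chars : List String) : ∀ (m : Nat), 1 ≤ m → ∀ i : Int,
    -((chars.length : Int) ^ m) ≤ i → i < (chars.length : Int) ^ m →
    find_ith_seq i (m : Int) chars = (lsbDig chars m i).reverse := by
  intro m
  induction m with
  | zero => omega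
  | succ m ih =>
      intro _ i hlo hhi
      have hk0 : (0:Int) < chars.length := by
        rcases Nat.eq_zero_or_pos chars.length with h | h
        · rw [h] at hlo hhi; simp at hlo hhi; omega
        · exact_mod_cast h
      have htn : ((m + 1 : Nat) : Int).toNat = m + 1 := by omega
      rcases Nat.eq_zero_or_pos m with hm | hm
      · -- n = 1 base case
        subst hm
        rw [find_ith_seq]
        rw [if_neg (by rw [htn]; omega), if_pos (by norm_num)]
        have := cget_wrap chars i (by simpa using hlo) (by simpa using hhi)
        simp [lsbDig, this]
      · -- n ≥ 2 step
        have hchunk : (((m + 1 : Nat) : Int) - 1).toNat = m := by omega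
        rw [find_ith_seq]
        rw [if_neg (by rw [htn]; omega), if_neg (by omega), if_neg (by omega)]
        simp only [hchunk]
        have hp : (0:Int) < (chars.length : Int) ^ m := by positivity
        have hfd : PySem.Int.floordiv i ((chars.length : Int) ^ m) =
            i / (chars.length : Int) ^ m := PySem.Int.floordiv_eq_ediv_of_pos hp
        have hmd : PySem.Int.mod i ((chars.length : Int) ^ m) =
            i % (chars.length : Int) ^ m := PySem.Int.mod_eq_emod_of_pos hp
        have hnext : ((m + 1 : Nat) : Int) - 1 = (m : Int) := by push_cast; ring
        have hreclo : -((chars.length : Int) ^ m) ≤ i % (chars.length : Int) ^ m := by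
          have := Int.emod_nonneg i (by omega : (chars.length : Int) ^ m ≠ 0); omega
        have hrechi : i % (chars.length : Int) ^ m < (chars.length : Int) ^ m :=
          Int.emod_lt_of_pos i hp
        have hdlo : -(chars.length : Int) ≤ i / (chars.length : Int) ^ m := by
          rw [Int.le_ediv_iff_mul_le hp]
          calc -(chars.length : Int) * (chars.length : Int) ^ m
              = -((chars.length : Int) ^ (m + 1)) := by rw [pow_succ']; ring
            _ ≤ i := by exact_mod_cast hlo
        have hdhi : i / (chars.length : Int) ^ m < (chars.length : Int) := by
          rw [Int.ediv_lt_iff_lt_mul hp]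
          calc i < (chars.length : Int) ^ (m + 1) := by exact_mod_cast hhi
            _ = (chars.length : Int) * (chars.length : Int) ^ m := by rw [pow_succ']
        rw [hfd, hmd, hnext, ih hm _ hreclo hrechi,
          cget_wrap chars _ hdlo hdhi, lsb_msb chars hk0 m i]
        simp

-- ===== VERDICT (by name: the statement is the Claim_ definition above) =====
theorem find_ith_seq_spec : Claim_equal_find_ith_seq := by
  intro i n chars _ hpre
  obtain ⟨hn, hlo, hhi⟩ := hpre
  unfold Spec_find_ith_seq
  have hk : chars ≠ [] := by
    intro h; subst h
    simp only [List.length_nil, Nat.cast_zero] at hlo hhi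
    rw [zero_pow (by omega : n.toNat ≠ 0)] at hlo hhi; omega
  have hcast : ((n.toNat : Nat) : Int) = n := Int.toNat_of_nonneg (by omega)
  rw [alt_eq i n chars hk (by omega)]
  have := a_eq chars n.toNat (by omega) i hlo hhi
  rw [hcast] at this
  exact this
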